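-- pv_equiv track=rewrite | github.com/jfulghum/practice_thy_algos | matrices/flip_matrix.py | solution
-- ===== SOURCE A (Python) =====
-- def solution(original_matrix):
--   max_len = len(original_matrix[0]) // 2
--   reversed_matrix = []
--
--   for row in original_matrix:
--     new_row = row[::-1]
--     reversed_matrix.append(new_row)
--
--   #initialize
--   combined_matrix = [[0 for _ in range(len(original_matrix[0]))] for _ in range(len(original_matrix))]
--
--   for i in range(len(combined_matrix)):
--     for j in range(len(combined_matrix[0])):
--         combined_matrix[i][j] = original_matrix[i][j] + reversed_matrix[i][j]
--
--   return [row[:max_len] for row in combined_matrix]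
-- ===== SOURCE B (Python) =====
-- def solution(original_matrix):
--   k = len(original_matrix[0]) // 2
--   result = []
--   for row in original_matrix:
--     fwd = iter(row)
--     bwd = reversed(row)
--     pairs = []
--     for _ in range(k):
--       pairs.append(next(fwd) + next(bwd))
--     result.append(pairs)
--   return result
-- ===== Notes on version B (the rewrite author's own statement) =====
-- stated objective: alternative
-- what changed: B replaces A's three staged matrix passes (build a reversed matrix, fill a full-width zero-initialized combined matrix by index, then slice every row) with two synchronized lazy iterators per row (a forward iterator and a reversed iterator) from which it draws exactly the first-half pair sums, materializing no intermediate matrix.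
import Mathlib
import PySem

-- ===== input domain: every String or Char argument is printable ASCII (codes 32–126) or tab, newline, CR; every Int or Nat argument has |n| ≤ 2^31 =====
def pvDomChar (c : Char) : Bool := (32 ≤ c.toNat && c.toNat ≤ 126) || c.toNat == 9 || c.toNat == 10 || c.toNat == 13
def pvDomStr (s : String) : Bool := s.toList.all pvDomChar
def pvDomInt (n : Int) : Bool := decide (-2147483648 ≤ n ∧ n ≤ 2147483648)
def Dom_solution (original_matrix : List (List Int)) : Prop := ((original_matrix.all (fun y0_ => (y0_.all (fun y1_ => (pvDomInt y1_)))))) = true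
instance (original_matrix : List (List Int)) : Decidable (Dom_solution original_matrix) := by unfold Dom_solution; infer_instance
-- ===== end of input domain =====

-- B draws the first-half pair sums from two synchronized iterators per row (forward and
-- reversed) instead of A's staged passes (reversed matrix, full combined matrix, slicing).

-- ===== PORT A =====
def solution (original_matrix : List (List Int)) : List (List Int) :=
  let max_len := (original_matrix.headD []).length / 2
  -- for row in original_matrix: reversed_matrix.append(row[::-1])
  let reversed_matrix := original_matrix.foldl (fun acc row => acc ++ [row.reverse]) []
  -- combined_matrix[i][j] = original_matrix[i][j] + reversed_matrix[i][j]
  -- (indexing is in range on every input Pre_ admits; getD is exact there)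
  let combined_matrix :=
    (List.range original_matrix.length).map (fun i =>
      (List.range (original_matrix.headD []).length).map (fun j =>
        ((original_matrix.getD i []).getD j 0) + ((reversed_matrix.getD i []).getD j 0)))
  combined_matrix.map (fun row => row.take max_len)

-- ===== PORT B =====
-- the iterator-drawing loop: k steps, each takes the next element of the forward
-- stream and of the backward stream, appends their sum, and advances both streams
def pairsLoop : Nat → List Int → List Int → List Int → List Int
  | 0, _, _, pairs => pairs
  | k + 1, fwd, bwd, pairs =>
      pairsLoop k fwd.tail bwd.tail (pairs ++ [fwd.headD 0 + bwd.headD 0])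

def solution_alt (original_matrix : List (List Int)) : List (List Int) :=
  let k := (original_matrix.headD []).length / 2
  -- fwd = iter(row), bwd = reversed(row); in range on every input Pre_ admits
  original_matrix.foldl (fun result row => result ++ [pairsLoop k row row.reverse []]) []

-- ===== PRECONDITION & SPEC =====
-- Pre_ excludes exactly the inputs where A raises: the empty matrix (IndexError on
-- original_matrix[0]) and matrices with a row shorter than the first row (IndexError
-- while filling combined_matrix).
def Pre_solution (original_matrix : List (List Int)) : Prop :=
  original_matrix ≠ [] ∧
    ∀ row ∈ original_matrix, (original_matrix.headD []).length ≤ row.length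
instance (original_matrix : List (List Int)) : Decidable (Pre_solution original_matrix) := by
  unfold Pre_solution; infer_instance
def pvWitness_solution : List (List Int) := [[1, 2, 3], [4, 5, 6]]

def Spec_solution (original_matrix : List (List Int)) (out : List (List Int)) : Prop := out = solution_alt original_matrix
instance (original_matrix : List (List Int)) (out : List (List Int)) : Decidable (Spec_solution original_matrix out) := by unfold Spec_solution; infer_instance

-- ===== CLAIM (what is proved, stated in full; the proofs are below) =====
def Claim_equal_solution : Prop := ∀ (original_matrix : List (List Int)), Dom_solution original_matrix → Pre_solution original_matrix → Spec_solution original_matrix (solution original_matrix)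

-- ===== LEMMAS AND PROOFS =====

theorem foldl_snoc (f : List Int → List Int) (m : List (List Int)) (acc : List (List Int)) :
    m.foldl (fun acc row => acc ++ [f row]) acc = acc ++ m.map f := by
  induction m generalizing acc with
  | nil => simp
  | cons r t ih => simp [ih]

theorem getD_tail (l : List Int) (j : Nat) : l.tail.getD j 0 = l.getD (j + 1) 0 := by
  cases l <;> simp [List.getD]

theorem pairsLoop_eq (k : Nat) (fwd bwd pairs : List Int) :
    pairsLoop k fwd bwd pairs =
      pairs ++ (List.range k).map (fun j => fwd.getD j 0 + bwd.getD j 0) := by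
  induction k generalizing fwd bwd pairs with
  | zero => simp [pairsLoop]
  | succ k ih =>
      rw [pairsLoop, ih, List.range_succ_eq_map]
      simp only [getD_tail, List.map_map, List.append_assoc,
        List.singleton_append, List.map_cons]
      cases fwd <;> cases bwd <;> simp [List.getD, Function.comp_def, List.map_const']

theorem solution_eq (m : List (List Int)) (hpre : Pre_solution m) :
    solution m = solution_alt m := by
  obtain ⟨hne, hlen⟩ := hpre
  unfold solution solution_alt
  simp only [foldl_snoc, List.nil_append, List.map_map]
  apply List.ext_getElem
  · simp
  · intro i h1 h2
    simp only [List.getElem_map, List.getElem_range, Function.comp]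
    have hi : i < m.length := by simpa using h1
    rw [pairsLoop_eq]
    apply List.ext_getElem
    · simp [List.length_take, Nat.div_le_self]
    · intro j hj1 hj2
      have hjm : j < (m.headD []).length / 2 := by simpa using hj2
      have hrow : (m.headD []).length ≤ m[i].length :=
        hlen _ (List.getElem_mem hi)
      have hjr : j < m[i].length := lt_of_lt_of_le (lt_of_lt_of_le hjm (Nat.div_le_self _ _)) hrow
      simp only [List.getElem_take, List.getElem_map, List.getElem_range, List.nil_append]
      have hmi : m.getD i [] = m[i] := List.getD_eq_getElem _ _ hi
      have hri : (List.map List.reverse m).getD i [] = m[i].reverse := by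
        rw [List.getD_eq_getElem _ _ (by simpa using hi), List.getElem_map]
      rw [hmi, hri]

-- ===== VERDICT (by name: the statement is the Claim_ definition above) =====
theorem solution_spec : Claim_equal_solution := by
  intro m _ hpre
  exact solution_eq m hpre
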